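-- pv_equiv track=rewrite | github.com/MichaelGs27/Sexto_Semestre | Sistemas_Distribuidos/ejercicio.py | compare_vectors
-- ===== SOURCE A (Python) =====
-- def compare_vectors(vector1, vector2):
--     """
--     Compara dos vectores de relojes y determina su relación causal.
--     Retorna:
--         -1 si vector1 -> vector2 (vector1 sucedió antes que vector2)
--         1 si vector2 -> vector1 (vector2 sucedió antes que vector1)
--         0 si son concurrentes
--     """
--     less_than = False
--     greater_than = False
--
--     for v1, v2 in zip(vector1, vector2):
--         if v1 < v2:
--             less_than = True
--         elif v1 > v2:
--             greater_than = True
--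
--         if less_than and greater_than:
--             return 0  # Concurrentes
--
--     if less_than:
--         return -1  # vector1 sucedió antes que vector2
--     if greater_than:
--         return 1   # vector2 sucedió antes que vector1
--     return 0       # Iguales (mismo evento)
-- ===== SOURCE B (Python) =====
-- def compare_vectors(vector1, vector2):
--     """Causal comparison via pointwise-min dominance: vector1 happens-before
--     vector2 iff the componentwise minimum equals vector1 (truncated) but not
--     vector2, and symmetrically; otherwise equal/concurrent -> 0."""
--     k = min(len(vector1), len(vector2))
--     x = vector1[:k]
--     y = vector2[:k]
--     m = [min(a, b) for a, b in zip(x, y)]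
--     before = (m == x)   # vector1 <= vector2 componentwise
--     after = (m == y)    # vector2 <= vector1 componentwise
--     if before and not after:
--         return -1
--     if after and not before:
--         return 1
--     return 0
-- ===== Notes on version B (the rewrite author's own statement) =====
-- stated objective: alternative
-- what changed: Replaces A's flag-tracking scan with a pointwise-min dominance test: build the componentwise minimum list once and decide the causal relation by whole-list equality of that merge with each truncated input (m == x means vector1 dominated, m == y means vector2 dominated).
import Mathlib
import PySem

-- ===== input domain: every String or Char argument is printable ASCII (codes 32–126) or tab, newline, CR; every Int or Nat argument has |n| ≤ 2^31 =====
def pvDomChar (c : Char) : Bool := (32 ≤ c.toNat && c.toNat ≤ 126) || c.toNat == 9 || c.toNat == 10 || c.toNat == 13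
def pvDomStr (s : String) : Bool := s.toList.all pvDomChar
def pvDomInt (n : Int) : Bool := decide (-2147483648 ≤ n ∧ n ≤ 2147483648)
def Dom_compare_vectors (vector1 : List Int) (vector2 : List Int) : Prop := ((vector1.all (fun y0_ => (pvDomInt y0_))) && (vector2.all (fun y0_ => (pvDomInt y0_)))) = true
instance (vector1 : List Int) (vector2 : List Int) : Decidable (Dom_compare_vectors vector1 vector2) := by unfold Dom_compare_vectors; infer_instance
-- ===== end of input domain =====

-- B replaces A's two-flag early-exit scan with a pointwise-min dominance test decided by whole-list equality (alternative decomposition, same cost).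

-- ===== PORT A =====
-- A's for-loop over zip with the two flags and the early return 0 once both are set
def compareVectorsLoop : List (Int × Int) → Bool → Bool → Int
  | [], less_than, greater_than =>
      if less_than then -1 else if greater_than then 1 else 0
  | (v1, v2) :: rest, less_than, greater_than =>
      let less_than' := if v1 < v2 then true else less_than
      let greater_than' := if v1 < v2 then greater_than
                           else if v1 > v2 then true else greater_than
      if less_than' && greater_than' then 0
      else compareVectorsLoop rest less_than' greater_than'

def compare_vectors (vector1 : List Int) (vector2 : List Int) : Int :=
  compareVectorsLoop (vector1.zip vector2) false false

-- ===== PORT B =====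
-- k = min of the lengths; x, y the slices vector1[:k], vector2[:k] (nonnegative bound, = take);
-- m the componentwise minimum; then decide from the two list equalities.
def compare_vectors_alt (vector1 : List Int) (vector2 : List Int) : Int :=
  let k := min vector1.length vector2.length
  let x := vector1.take k
  let y := vector2.take k
  let m := (x.zip y).map (fun p => min p.1 p.2)
  let before := m == x
  let after := m == y
  if before && !after then -1
  else if after && !before then 1
  else 0

-- ===== PRECONDITION & SPEC =====
def Spec_compare_vectors (vector1 : List Int) (vector2 : List Int) (out : Int) : Prop := out = compare_vectors_alt vector1 vector2
instance (vector1 : List Int) (vector2 : List Int) (out : Int) : Decidable (Spec_compare_vectors vector1 vector2 out) := by unfold Spec_compare_vectors; infer_instance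

-- ===== CLAIM (what is proved, stated in full; the proofs are below) =====
def Claim_equal_compare_vectors : Prop := ∀ (vector1 : List Int) (vector2 : List Int), Dom_compare_vectors vector1 vector2 → Spec_compare_vectors vector1 vector2 (compare_vectors vector1 vector2)

-- ===== LEMMAS AND PROOFS =====

-- A's loop result, for flags that are not yet both set, expressed through the two 'any' facts
theorem compareVectorsLoop_eq (z : List (Int × Int)) :
    ∀ (lt gt : Bool), (lt && gt) = false →
      compareVectorsLoop z lt gt =
        (if (lt || z.any (fun p => decide (p.1 < p.2)))
            && (gt || z.any (fun p => decide (p.2 < p.1))) then 0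
         else if lt || z.any (fun p => decide (p.1 < p.2)) then -1
         else if gt || z.any (fun p => decide (p.2 < p.1)) then 1
         else 0) := by
  induction z with
  | nil =>
      intro lt gt h
      cases lt <;> cases gt <;> simp_all [compareVectorsLoop]
  | cons hd tl ih =>
      intro lt gt h
      obtain ⟨a, b⟩ := hd
      simp only [compareVectorsLoop, List.any_cons]
      by_cases h1 : a < b <;> by_cases h2 : b < a
      · omega
      · -- a < b, ¬ b < a
        have e2 : decide (b < a) = false := by simp [h2]
        cases gt with
        | true =>
            have hlt : lt = false := by cases lt <;> simp_all
            simp [h1, hlt]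
        | false =>
            simp only [decide_true, h1, if_true,
              Bool.and_false, Bool.false_or, e2]
            rw [if_neg (by simp), ih true false rfl]
            clear ih h
            simp only [Bool.false_or]
            set A := tl.any (fun p => decide (p.1 < p.2)) with hA
            set B := tl.any (fun p => decide (p.2 < p.1)) with hB
            cases A <;> cases B <;> simp
      · -- ¬ a < b, b < a
        have e1 : decide (a < b) = false := by simp [h1]
        have e2 : decide (b < a) = true := by simp [h2]
        have hg : a > b := h2
        cases lt with
        | true =>
            have hgt : gt = false := by cases gt <;> simp_all
            simp [h1, hg, hgt]
        | false =>
            simp only [if_neg h1, if_pos hg, e1, Bool.false_or]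
            rw [if_neg (by simp), ih false true rfl]
            clear ih h
            simp only [e2, Bool.false_or]
            set A := tl.any (fun p => decide (p.1 < p.2)) with hA
            set B := tl.any (fun p => decide (p.2 < p.1)) with hB
            cases A <;> cases B <;> simp
      · -- equal components: both flags unchanged
        have heq : a = b := by omega
        subst heq
        have e1 : decide (a < a) = false := by simp
        simp only [if_neg h1, gt_iff_lt, e1, Bool.false_or]
        rw [if_neg (by simpa using h), ih lt gt h]

-- truncating both vectors to the shorter length does not change the zip
theorem take_zip_take (v1 v2 : List Int) :
    (v1.take (min v1.length v2.length)).zip (v2.take (min v1.length v2.length)) = v1.zip v2 := by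
  induction v1 generalizing v2 with
  | nil => simp
  | cons a t ih =>
      cases v2 with
      | nil => simp
      | cons b u =>
          simp only [List.length_cons, List.zip_cons_cons]
          rw [Nat.succ_min_succ, List.take_succ_cons, List.take_succ_cons,
            List.zip_cons_cons, ih u]

-- B's 'm == x' test = 'no component of vector1 exceeds vector2'
theorem minmap_eq_fst (z : List (Int × Int)) :
    (z.map (fun p => min p.1 p.2) == z.map Prod.fst) = !z.any (fun p => decide (p.2 < p.1)) := by
  rw [Bool.eq_iff_iff, beq_iff_eq, List.map_eq_map_iff]
  simp only [Bool.not_eq_eq_eq_not, Bool.not_true, List.any_eq_false]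
  constructor
  · intro h p hp
    have := min_eq_left_iff.mp (h p hp)
    simpa using not_lt.mpr this
  · intro h p hp
    exact min_eq_left (by simpa [not_lt] using h p hp)

-- B's 'm == y' test = 'no component of vector2 exceeds vector1'
theorem minmap_eq_snd (z : List (Int × Int)) :
    (z.map (fun p => min p.1 p.2) == z.map Prod.snd) = !z.any (fun p => decide (p.1 < p.2)) := by
  rw [Bool.eq_iff_iff, beq_iff_eq, List.map_eq_map_iff]
  simp only [Bool.not_eq_eq_eq_not, Bool.not_true, List.any_eq_false]
  constructor
  · intro h p hp
    have := min_eq_right_iff.mp (h p hp)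
    simpa using not_lt.mpr this
  · intro h p hp
    exact min_eq_right (by simpa [not_lt] using h p hp)

-- ===== VERDICT (by name: the statement is the Claim_ definition above) =====
theorem compare_vectors_spec : Claim_equal_compare_vectors := by
  intro v1 v2 _
  unfold Spec_compare_vectors compare_vectors compare_vectors_alt
  dsimp only
  have hx : v1.take (min v1.length v2.length) = (v1.zip v2).map Prod.fst := by
    rw [← take_zip_take v1 v2, List.map_fst_zip]
    simp [List.length_take]
  have hy : v2.take (min v1.length v2.length) = (v1.zip v2).map Prod.snd := by
    rw [← take_zip_take v1 v2, List.map_snd_zip]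
    simp [List.length_take]
  rw [take_zip_take, hx, hy, minmap_eq_fst, minmap_eq_snd,
    compareVectorsLoop_eq _ false false rfl]
  simp only [Bool.false_or]
  cases (v1.zip v2).any (fun p => decide (p.1 < p.2)) <;>
    cases (v1.zip v2).any (fun p => decide (p.2 < p.1)) <;> simp
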